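-- pv_equiv track=rewrite | github.com/samuelczhao/farswarm | farswarm/analysis/networks.py | _build_archetype_affinity
-- ===== SOURCE A (Python) =====
-- from collections import defaultdict
--
-- def _build_archetype_affinity(
--     graph: dict[int, dict[int, int]],
--     agent_to_arch: dict[int, int],
--     arch_labels: dict[int, str],
-- ) -> dict[str, list[str]]:
--     """Map each archetype label to its most-interacted archetype labels."""
--     pair_weights: dict[tuple[int, int], int] = defaultdict(int)
--     for src, targets in graph.items():
--         src_arch = agent_to_arch.get(src, -1)
--         for tgt, weight in targets.items():
--             tgt_arch = agent_to_arch.get(tgt, -1)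
--             if src_arch != tgt_arch:
--                 pair_weights[(src_arch, tgt_arch)] += weight
--
--     affinity: dict[str, list[str]] = {}
--     for (a, b), _ in sorted(
--         pair_weights.items(), key=lambda x: -x[1],
--     ):
--         label_a = arch_labels.get(a, str(a))
--         label_b = arch_labels.get(b, str(b))
--         affinity.setdefault(label_a, [])
--         if label_b not in affinity[label_a]:
--             affinity[label_a].append(label_b)
--
--     return affinity
-- ===== SOURCE B (Python) =====
-- def _build_archetype_affinity(graph, agent_to_arch, arch_labels):
--     """Map each archetype label to its most-interacted archetype labels."""
--     # flatten every edge to its (src_arch, tgt_arch) pair with its weight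
--     edges = [
--         ((agent_to_arch.get(src, -1), agent_to_arch.get(tgt, -1)), w)
--         for src, targets in graph.items()
--         for tgt, w in targets.items()
--     ]
--     # aggregate cross-archetype weights per pair
--     acc = {}
--     for key, w in edges:
--         if key[0] != key[1]:
--             acc[key] = acc.get(key, 0) + w
--     ranked = sorted(acc.items(), key=lambda kv: -kv[1])
--     labelled = [
--         (arch_labels.get(a, str(a)), arch_labels.get(b, str(b)))
--         for (a, b), _ in ranked
--     ]
--     return {
--         la: list(dict.fromkeys(lb for la2, lb in labelled if la2 == la))
--         for la in dict.fromkeys(la for la, _ in labelled)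
--     }
-- ===== Notes on version B (the rewrite author's own statement) =====
-- stated objective: alternative
-- what changed: A builds the affinity dict incrementally with setdefault/membership/append mutations inside one loop over the globally sorted pairs; B flattens the graph to an edge list, aggregates with a plain dict, sorts once, labels the pairs, and then produces the result by dict.fromkeys dedup of the source labels plus a per-label filtered dedup comprehension.
import Mathlib
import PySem

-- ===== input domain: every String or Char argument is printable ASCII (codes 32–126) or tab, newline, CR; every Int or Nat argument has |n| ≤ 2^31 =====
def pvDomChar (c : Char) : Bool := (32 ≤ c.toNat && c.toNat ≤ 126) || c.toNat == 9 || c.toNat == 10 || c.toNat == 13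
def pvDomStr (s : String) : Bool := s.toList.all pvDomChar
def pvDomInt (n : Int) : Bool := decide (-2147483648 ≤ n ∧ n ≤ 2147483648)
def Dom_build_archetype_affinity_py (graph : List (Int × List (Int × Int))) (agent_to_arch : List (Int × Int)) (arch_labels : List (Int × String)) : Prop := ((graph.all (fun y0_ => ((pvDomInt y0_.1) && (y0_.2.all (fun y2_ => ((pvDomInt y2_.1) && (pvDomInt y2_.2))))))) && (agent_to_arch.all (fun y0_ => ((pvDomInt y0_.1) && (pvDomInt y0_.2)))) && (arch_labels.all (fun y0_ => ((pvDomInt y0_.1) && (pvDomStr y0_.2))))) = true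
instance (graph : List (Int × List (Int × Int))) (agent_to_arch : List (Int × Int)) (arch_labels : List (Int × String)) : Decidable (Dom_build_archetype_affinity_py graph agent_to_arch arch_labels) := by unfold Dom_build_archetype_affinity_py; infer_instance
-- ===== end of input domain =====

-- B replaces A's incremental setdefault/append dict loop by flatten–aggregate–sort followed by two
-- dedup/filter comprehension passes (same cost, different decomposition); the return values are proved equal.

-- ===== PORT A =====
def build_archetype_affinity_py (graph : List (Int × List (Int × Int))) (agent_to_arch : List (Int × Int)) (arch_labels : List (Int × String)) : List (String × List String) :=
  let a2a : PySem.Dict Int Int := PySem.Dict.mk agent_to_arch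
  let labels : PySem.Dict Int String := PySem.Dict.mk arch_labels
  let pair_weights : PySem.Dict (Int × Int) Int :=
    graph.foldl (fun pw st =>
      let src_arch := a2a.getD st.1 (-1)
      st.2.foldl (fun pw tw =>
        let tgt_arch := a2a.getD tw.1 (-1)
        if src_arch ≠ tgt_arch then pw.modify (src_arch, tgt_arch) 0 (· + tw.2) else pw) pw)
      PySem.Dict.empty
  let sortedPairs := PySem.List.sorted pair_weights.items (fun x => -x.2)
  let affinity : PySem.Dict String (List String) :=
    sortedPairs.foldl (fun aff p =>
      let label_a := labels.getD p.1.1 (PySem.Int.toStr p.1.1)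
      let label_b := labels.getD p.1.2 (PySem.Int.toStr p.1.2)
      let aff' := aff.setdefault label_a []
      if label_b ∈ aff'.getD label_a [] then aff'
      else aff'.modify label_a [] (· ++ [label_b])) PySem.Dict.empty
  affinity.items

-- ===== PORT B =====
def build_archetype_affinity_py_alt (graph : List (Int × List (Int × Int))) (agent_to_arch : List (Int × Int)) (arch_labels : List (Int × String)) : List (String × List String) :=
  let a2a : PySem.Dict Int Int := PySem.Dict.mk agent_to_arch
  let labels : PySem.Dict Int String := PySem.Dict.mk arch_labels
  let edges := graph.flatMap (fun st =>
    st.2.map (fun tw => ((a2a.getD st.1 (-1), a2a.getD tw.1 (-1)), tw.2)))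
  let acc : PySem.Dict (Int × Int) Int :=
    edges.foldl (fun acc kw =>
      if kw.1.1 ≠ kw.1.2 then acc.insert kw.1 (acc.getD kw.1 0 + kw.2) else acc) PySem.Dict.empty
  let ranked := PySem.List.sorted acc.items (fun kv => -kv.2)
  let labelled := ranked.map (fun p =>
    (labels.getD p.1.1 (PySem.Int.toStr p.1.1), labels.getD p.1.2 (PySem.Int.toStr p.1.2)))
  (PySem.List.dedup (labelled.map (·.1))).map (fun la =>
    (la, PySem.List.dedup (labelled.filterMap (fun q => if q.1 = la then some q.2 else none))))

-- ===== PRECONDITION & SPEC =====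
def Spec_build_archetype_affinity_py (graph : List (Int × List (Int × Int))) (agent_to_arch : List (Int × Int)) (arch_labels : List (Int × String)) (out : List (String × List String)) : Prop := out = build_archetype_affinity_py_alt graph agent_to_arch arch_labels
instance (graph : List (Int × List (Int × Int))) (agent_to_arch : List (Int × Int)) (arch_labels : List (Int × String)) (out : List (String × List String)) : Decidable (Spec_build_archetype_affinity_py graph agent_to_arch arch_labels out) := by unfold Spec_build_archetype_affinity_py; infer_instance

-- ===== CLAIM (what is proved, stated in full; the proofs are below) =====
def Claim_equal_build_archetype_affinity_py : Prop := ∀ (graph : List (Int × List (Int × Int))) (agent_to_arch : List (Int × Int)) (arch_labels : List (Int × String)), Dom_build_archetype_affinity_py graph agent_to_arch arch_labels → Spec_build_archetype_affinity_py graph agent_to_arch arch_labels (build_archetype_affinity_py graph agent_to_arch arch_labels)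

-- ===== LEMMAS AND PROOFS =====

-- A's phase-2 loop body, as a step function on the affinity dict
def affStep (aff : PySem.Dict String (List String)) (p : String × String) : PySem.Dict String (List String) :=
  let aff' := aff.setdefault p.1 []
  if p.2 ∈ aff'.getD p.1 [] then aff'
  else aff'.modify p.1 [] (· ++ [p.2])

-- B's phase-2 result, as a function of the labelled pair list
def affSpec (M : List (String × String)) : List (String × List String) :=
  (PySem.List.dedup (M.map (·.1))).map (fun la =>
    (la, PySem.List.dedup (M.filterMap (fun q => if q.1 = la then some q.2 else none))))

lemma dedup_snoc {α : Type} [BEq α] [LawfulBEq α] [DecidableEq α] (xs : List α) (a : α) :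
    PySem.List.dedup (xs ++ [a]) =
      if a ∈ xs then PySem.List.dedup xs else PySem.List.dedup xs ++ [a] := by
  have hmem : a ∈ PySem.List.dedup xs ↔ a ∈ xs := PySem.List.mem_dedup xs a
  simp only [PySem.List.dedup, PySem.Set.ofList, List.foldl_append, List.foldl_cons,
    List.foldl_nil, PySem.Set.add] at *
  by_cases h : a ∈ xs
  · have := hmem.mpr h
    simp only [PySem.Set.empty] at this ⊢
    simp [this, h]
  · have : a ∉ List.foldl PySem.Set.add PySem.Set.empty xs := fun hm => h (hmem.mp hm)
    simp only [PySem.Set.empty] at this ⊢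
    simp [this, h]

lemma keys_mk_affSpec (M : List (String × String)) :
    (PySem.Dict.mk (affSpec M)).keys = PySem.List.dedup (M.map (·.1)) := by
  simp [affSpec, PySem.Dict.keys, List.map_map, Function.comp_def]

lemma nodup_keys_mk_affSpec (M : List (String × String)) :
    (PySem.Dict.mk (affSpec M)).keys.Nodup := by
  rw [keys_mk_affSpec]; exact PySem.List.nodup_dedup _

lemma getD_mk_affSpec (M : List (String × String)) (la : String)
    (h : la ∈ M.map (·.1)) :
    (PySem.Dict.mk (affSpec M)).getD la [] =
      PySem.List.dedup (M.filterMap (fun q => if q.1 = la then some q.2 else none)) := by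
  apply PySem.Dict.getD_of_mem_items _ _ (nodup_keys_mk_affSpec M)
  show _ ∈ affSpec M
  exact List.mem_map.mpr ⟨la, (PySem.List.mem_dedup _ _).mpr h, rfl⟩

lemma contains_mk_affSpec (M : List (String × String)) (la : String) :
    (PySem.Dict.mk (affSpec M)).contains la = decide (la ∈ M.map (·.1)) := by
  rw [PySem.Dict.contains_eq_decide_mem_keys, keys_mk_affSpec]
  simp

lemma filterMap_sel_snoc (M : List (String × String)) (p : String × String) (la : String) :
    (M ++ [p]).filterMap (fun q => if q.1 = la then some q.2 else none)
      = M.filterMap (fun q => if q.1 = la then some q.2 else none)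
        ++ (if p.1 = la then [p.2] else []) := by
  simp only [List.filterMap_append, List.filterMap_cons, List.filterMap_nil]
  split <;> simp_all

-- the heart of the proof: A's phase-2 fold builds exactly the dict whose items are affSpec M
lemma aff_fold_eq (M : List (String × String)) :
    M.foldl affStep PySem.Dict.empty = PySem.Dict.mk (affSpec M) := by
  induction M using List.reverseRecOn with
  | nil => rfl
  | append_singleton M p ih =>
    rw [List.foldl_append, List.foldl_cons, List.foldl_nil, ih]
    show affStep (PySem.Dict.mk (affSpec M)) p = PySem.Dict.mk (affSpec (M ++ [p]))
    set d := PySem.Dict.mk (affSpec M) with hd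
    by_cases hmem : p.1 ∈ M.map (·.1)
    · have hcont : d.contains p.1 = true := by
        rw [contains_mk_affSpec]; simpa using hmem
      have hsd : d.setdefault p.1 [] = d := PySem.Dict.setdefault_of_contains d [] hcont
      have hgd := getD_mk_affSpec M p.1 hmem
      by_cases hin : p.2 ∈ M.filterMap (fun q => if q.1 = p.1 then some q.2 else none)
      · -- target label already in the bucket: dict unchanged, spec unchanged
        have hspec : affSpec (M ++ [p]) = affSpec M := by
          unfold affSpec
          rw [List.map_append, List.map_cons, List.map_nil, dedup_snoc, if_pos hmem]
          apply List.map_congr_left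
          intro la hla
          rw [filterMap_sel_snoc]
          by_cases hpa : p.1 = la
          · subst hpa
            rw [if_pos rfl, dedup_snoc, if_pos hin]
          · rw [if_neg hpa, List.append_nil]
        rw [hspec]
        unfold affStep
        simp only [hsd]
        rw [hgd, if_pos ((PySem.List.mem_dedup _ _).mpr hin)]
      · -- new target label appended to the existing bucket
        have hspec : affSpec (M ++ [p]) =
            (affSpec M).map (fun e => if e.1 = p.1 then (e.1, e.2 ++ [p.2]) else e) := by
          unfold affSpec
          rw [List.map_append, List.map_cons, List.map_nil, dedup_snoc, if_pos hmem,
            List.map_map]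
          apply List.map_congr_left
          intro la hla
          rw [filterMap_sel_snoc]
          by_cases hpa : p.1 = la
          · subst hpa
            simp only [Function.comp_def, if_true]
            rw [dedup_snoc, if_neg hin]
          · simp only [Function.comp_def, if_neg hpa, List.append_nil]
            simp [Ne.symm hpa]
        rw [hspec]
        unfold affStep
        simp only [hsd]
        rw [hgd, if_neg (fun hc => hin ((PySem.List.mem_dedup _ _).mp hc))]
        rw [PySem.Dict.modify, hgd]
        apply PySem.Dict.ext
        rw [PySem.Dict.items_insert_of_contains _ _ hcont]
        show _ = List.map _ d.items
        apply List.map_congr_left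
        intro e he
        by_cases hc : e.1 = p.1
        · have he1 : e = (p.1, PySem.List.dedup (M.filterMap (fun q => if q.1 = p.1 then some q.2 else none))) := by
            obtain ⟨la, hla, rfl⟩ := List.mem_map.mp he
            simp only at hc
            subst hc
            rfl
          rw [if_pos (by simp [hc]), if_pos hc, he1]
        · rw [if_neg (by simp [hc]), if_neg hc]
    · -- fresh source label: a new (p.1, [p.2]) entry is appended
      have hcont : d.contains p.1 = false := by
        rw [contains_mk_affSpec]; simpa using hmem
      have hsd : d.setdefault p.1 [] = d.insert p.1 [] :=
        PySem.Dict.setdefault_of_not_contains d [] hcont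
      have hspec : affSpec (M ++ [p]) = affSpec M ++ [(p.1, [p.2])] := by
        unfold affSpec
        rw [List.map_append, List.map_cons, List.map_nil, dedup_snoc, if_neg hmem,
          List.map_append]
        congr 1
        · apply List.map_congr_left
          intro la hla
          rw [filterMap_sel_snoc]
          have hla' : la ∈ M.map (·.1) := (PySem.List.mem_dedup _ _).mp hla
          have : p.1 ≠ la := fun h => hmem (h ▸ hla')
          rw [if_neg this, List.append_nil]
        · simp only [List.map_cons, List.map_nil]
          rw [filterMap_sel_snoc, if_pos rfl]
          have : M.filterMap (fun q => if q.1 = p.1 then some q.2 else none) = [] := by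
            rw [List.filterMap_eq_nil_iff]
            intro q hq
            have : q.1 ≠ p.1 := fun h => hmem (List.mem_map.mpr ⟨q, hq, h⟩)
            simp [this]
          rw [this]
          rfl
      rw [hspec]
      unfold affStep
      simp only [hsd]
      rw [PySem.Dict.getD_insert_self]
      simp only [List.not_mem_nil, if_false]
      rw [PySem.Dict.modify, PySem.Dict.getD_insert_self, PySem.Dict.insert_insert_self]
      apply PySem.Dict.ext
      rw [PySem.Dict.items_insert_of_not_contains _ _ hcont]
      rfl

-- connects A's phase-2 fold (labels computed inside the loop body) to affSpec of the labelled list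
lemma foldA_eq (L : List ((Int × Int) × Int)) (labels : PySem.Dict Int String) :
    (L.foldl (fun aff p =>
      let label_a := labels.getD p.1.1 (PySem.Int.toStr p.1.1)
      let label_b := labels.getD p.1.2 (PySem.Int.toStr p.1.2)
      let aff' := aff.setdefault label_a []
      if label_b ∈ aff'.getD label_a [] then aff'
      else aff'.modify label_a [] (· ++ [label_b])) PySem.Dict.empty).items
    = affSpec (L.map (fun p =>
        (labels.getD p.1.1 (PySem.Int.toStr p.1.1), labels.getD p.1.2 (PySem.Int.toStr p.1.2)))) := by
  have h := aff_fold_eq (L.map (fun p =>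
    (labels.getD p.1.1 (PySem.Int.toStr p.1.1), labels.getD p.1.2 (PySem.Int.toStr p.1.2))))
  rw [List.foldl_map] at h
  exact congrArg PySem.Dict.items h

-- foldA_eq restated in the zeta/modify-normal form the verdict's simp leaves behind
lemma foldA_eq' (L : List ((Int × Int) × Int)) (labels : PySem.Dict Int String) :
    (L.foldl (fun aff p =>
      if labels.getD p.1.2 (PySem.Int.toStr p.1.2) ∈
          (aff.setdefault (labels.getD p.1.1 (PySem.Int.toStr p.1.1)) []).getD
            (labels.getD p.1.1 (PySem.Int.toStr p.1.1)) [] then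
        aff.setdefault (labels.getD p.1.1 (PySem.Int.toStr p.1.1)) []
      else
        (aff.setdefault (labels.getD p.1.1 (PySem.Int.toStr p.1.1)) []).insert
          (labels.getD p.1.1 (PySem.Int.toStr p.1.1))
          ((aff.setdefault (labels.getD p.1.1 (PySem.Int.toStr p.1.1)) []).getD
              (labels.getD p.1.1 (PySem.Int.toStr p.1.1)) [] ++
            [labels.getD p.1.2 (PySem.Int.toStr p.1.2)])) PySem.Dict.empty).items
    = affSpec (L.map (fun p =>
        (labels.getD p.1.1 (PySem.Int.toStr p.1.1), labels.getD p.1.2 (PySem.Int.toStr p.1.2)))) :=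
  foldA_eq L labels

-- ===== VERDICT (by name: the statement is the Claim_ definition above) =====
theorem build_archetype_affinity_py_spec : Claim_equal_build_archetype_affinity_py := by
  intro graph agent_to_arch arch_labels _
  unfold Spec_build_archetype_affinity_py
  simp only [build_archetype_affinity_py, build_archetype_affinity_py_alt,
    List.foldl_flatMap, List.foldl_map, PySem.Dict.modify]
  rw [foldA_eq']
  rfl
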